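-- pv_equiv track=rewrite | github.com/abhishek25dh/exp-pipeline | layout_11_generator.py | allot_verbatim_phrases
-- ===== SOURCE A (Python) =====
-- def allot_verbatim_phrases(tokens, n_nodes):
--     """Priority-based verbatim phrase allocation for Layout 11 (Mind-Map Orbit).
--
--     Priority order:
--       P1 : core concept   ← always highest; gets phrase first
--       P2 : node group A   ← randomly assigned at generation time
--       P3 : node group B
--       P4 : node group C
--       P5 : node group D
--       Within each group: image > text label
--
--     The group-to-priority mapping is determined by the caller shuffling
--     node indices before passing them; this function just works top-down.
--
--     Algorithm:
--     - Build a flat slot list: [core, g_P2_img, g_P2_txt, g_P3_img, …]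
--     - Walk slots top-down; give each slot 1 token (core gets 2 if spare).
--     - The last filled slot absorbs any leftover tokens.
--     - Slots beyond available tokens → None (element is dropped).
--
--     Returns:
--       core_phrase  : str  (verbatim first phrase)
--       node_phrases : list[(img_phrase|None, txt_phrase|None)] indexed by
--                      the ORDER nodes were passed in (after caller shuffle).
--     """
--     n_tokens = len(tokens)
--
--     # Priority-based node count: core needs 2 tokens minimum, each node needs 3
--     # (budget for 1 img + 1 txt + 1 spare so phrases aren't single stop-words).
--     # Drop lower-priority nodes when token budget is too tight.
--     n_active = min(n_nodes, max(0, (n_tokens - 2) // 3))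
--
--     n_slots = 1 + 2 * n_active         # core + img/txt per active node
--
--     slot_results = [None] * n_slots
--     t = 0
--     for i in range(n_slots):
--         if t >= n_tokens:
--             break
--         left = n_tokens - t
--         remaining_slots = n_slots - i
--         give = 2 if (i == 0 and left > remaining_slots) else 1
--         give = min(give, left)
--         slot_results[i] = " ".join(tokens[t: t + give])
--         t += give
--
--     # Append leftover tokens to the last filled slot
--     if t < n_tokens:
--         for i in range(n_slots - 1, -1, -1):
--             if slot_results[i] is not None:
--                 slot_results[i] += " " + " ".join(tokens[t:])
--                 break
--
--     core_phrase = slot_results[0]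
--     # Pad to n_nodes so caller always gets a list of length n_nodes
--     node_phrases = []
--     for i in range(n_nodes):
--         if i < n_active:
--             node_phrases.append((slot_results[1 + 2 * i], slot_results[1 + 2 * i + 1]))
--         else:
--             node_phrases.append((None, None))   # dropped — token budget exhausted
--     return core_phrase, node_phrases
-- ===== SOURCE B (Python) =====
-- def allot_verbatim_phrases(tokens, n_nodes):
--     """Closed-form reallocation: core always takes tokens[0:2] when any node is
--     active (else all tokens); node i takes tokens[2+2i] / tokens[3+2i], the last
--     active node's text absorbing every leftover token; pad with (None, None)."""
--     n_active = min(n_nodes, max(0, (len(tokens) - 2) // 3))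
--     if n_active <= 0:
--         core = " ".join(tokens) if tokens else None
--         return core, [(None, None)] * n_nodes
--     core = " ".join(tokens[:2])
--     nodes = []
--     for i in range(n_active):
--         img = tokens[2 + 2 * i]
--         txt = tokens[3 + 2 * i] if i < n_active - 1 else " ".join(tokens[3 + 2 * i:])
--         nodes.append((img, txt))
--     nodes += [(None, None)] * (n_nodes - n_active)
--     return core, nodes
-- ===== Notes on version B (the rewrite author's own statement) =====
-- stated objective: simpler
-- what changed: B replaces A's greedy slot-filling loop over a mutable slot array plus a backward leftover-appending scan by a closed-form slicing: core = first two tokens (or all tokens when no node is active), node i = tokens[2+2i]/tokens[3+2i] with the last active node's text absorbing the tail, then padding with (None, None).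
import Mathlib
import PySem

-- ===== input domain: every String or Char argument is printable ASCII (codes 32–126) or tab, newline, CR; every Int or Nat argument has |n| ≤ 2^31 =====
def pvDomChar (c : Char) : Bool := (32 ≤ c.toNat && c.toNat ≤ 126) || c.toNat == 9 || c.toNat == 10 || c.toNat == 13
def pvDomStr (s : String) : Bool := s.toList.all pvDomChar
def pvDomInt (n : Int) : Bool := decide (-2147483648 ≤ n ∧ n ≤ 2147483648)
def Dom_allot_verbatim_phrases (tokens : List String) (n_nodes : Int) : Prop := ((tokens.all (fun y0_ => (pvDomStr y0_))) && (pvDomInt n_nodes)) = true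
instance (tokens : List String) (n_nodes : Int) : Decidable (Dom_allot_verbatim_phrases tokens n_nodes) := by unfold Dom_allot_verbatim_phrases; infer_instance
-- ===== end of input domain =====

-- B replaces A's slot-filling loop + backward leftover scan by a closed-form slicing of the
-- token list (simpler decomposition, same cost); equivalence is about the return value only.

-- ===== PORT A =====
-- Python 'xs[i] = v'; exact for 0 ≤ i < len(xs), the only indices A's loops reach (inside Pre_)
def pvSetA {α : Type} (xs : List α) (i : Int) (v : α) : List α := xs.set i.toNat v

-- the 'for i in range(n_slots)' filling loop, fuel = number of remaining iterations, i the loop index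
def pvFillA (tokens : List String) (n_tokens n_slots : Int) :
    Nat → Int → List (Option String) × Int → List (Option String) × Int
  | 0, _, st => st
  | k+1, i, (slots, t) =>
    if n_tokens ≤ t then (slots, t)          -- 'if t >= n_tokens: break'
    else
      let left := n_tokens - t
      let remaining_slots := n_slots - i
      let give : Int := if i = 0 ∧ remaining_slots < left then 2 else 1
      let give2 := min give left
      pvFillA tokens n_tokens n_slots k (i+1)
        (pvSetA slots i (some (PySem.Str.join " " (PySem.List.slice tokens (some t) (some (t + give2))))),
         t + give2)

-- the 'for i in range(n_slots-1, -1, -1)' leftover loop (breaks at the first non-None slot)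
def pvTailA (tokens : List String) (t : Int) :
    Nat → Int → List (Option String) → List (Option String)
  | 0, _, slots => slots
  | k+1, i, slots =>
    match (PySem.List.pyGet? slots i).getD none with
    | some s => pvSetA slots i (some (s ++ " " ++ PySem.Str.join " " (PySem.List.slice tokens (some t) none)))
    | none => pvTailA tokens t k (i-1) slots

def allot_verbatim_phrases (tokens : List String) (n_nodes : Int) :
    Option String × (List (Option String × Option String)) :=
  let n_tokens : Int := tokens.length
  let n_active : Int := min n_nodes (max 0 (PySem.Int.floordiv (n_tokens - 2) 3))
  let n_slots : Int := 1 + 2 * n_active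
  let st := pvFillA tokens n_tokens n_slots n_slots.toNat 0 (List.replicate n_slots.toNat none, 0)
  let slots := if st.2 < n_tokens then pvTailA tokens st.2 n_slots.toNat (n_slots - 1) st.1 else st.1
  -- slot_results[0]: IndexError on an empty slot list (n_nodes < 0) is excluded by Pre_
  let core := (PySem.List.pyGet? slots 0).getD none
  (core,
   (PySem.List.pyRange 0 n_nodes).map (fun i =>
     if i < n_active then
       ((PySem.List.pyGet? slots (1 + 2 * i)).getD none,
        (PySem.List.pyGet? slots (1 + 2 * i + 1)).getD none)
     else (none, none)))

-- ===== PORT B =====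
def allot_verbatim_phrases_alt (tokens : List String) (n_nodes : Int) :
    Option String × (List (Option String × Option String)) :=
  let n_tokens : Int := tokens.length
  let n_active : Int := min n_nodes (max 0 (PySem.Int.floordiv (n_tokens - 2) 3))
  if n_active ≤ 0 then
    (if tokens = [] then none else some (PySem.Str.join " " tokens),
     List.replicate n_nodes.toNat (none, none))
  else
    let core := some (PySem.Str.join " " (PySem.List.slice tokens none (some 2)))
    let nodes := (PySem.List.pyRange 0 n_active).map (fun i =>
      let img := (PySem.List.pyGet? tokens (2 + 2 * i)).getD ""
      let txt := if i < n_active - 1 then (PySem.List.pyGet? tokens (3 + 2 * i)).getD ""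
                 else PySem.Str.join " " (PySem.List.slice tokens (some (3 + 2 * i)) none)
      (some img, some txt))
    (core, nodes ++ List.replicate (n_nodes - n_active).toNat (none, none))

-- ===== PRECONDITION & SPEC =====
-- A raises IndexError for n_nodes < 0 (slot_results has non-positive size, so slot_results[0] fails);
-- Pre_ excludes exactly those inputs.
def Pre_allot_verbatim_phrases (tokens : List String) (n_nodes : Int) : Prop := 0 ≤ n_nodes
instance (tokens : List String) (n_nodes : Int) : Decidable (Pre_allot_verbatim_phrases tokens n_nodes) := by unfold Pre_allot_verbatim_phrases; infer_instance

def pvWitness_allot_verbatim_phrases : List String × Int := (["alpha", "b", "c", "d", "e", "f"], 2)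

def Spec_allot_verbatim_phrases (tokens : List String) (n_nodes : Int) (out : Option String × (List (Option String × Option String))) : Prop := out = allot_verbatim_phrases_alt tokens n_nodes
instance (tokens : List String) (n_nodes : Int) (out : Option String × (List (Option String × Option String))) : Decidable (Spec_allot_verbatim_phrases tokens n_nodes out) := by unfold Spec_allot_verbatim_phrases; infer_instance

-- ===== CLAIM (what is proved, stated in full; the proofs are below) =====
def Claim_equal_allot_verbatim_phrases : Prop := ∀ (tokens : List String) (n_nodes : Int), Dom_allot_verbatim_phrases tokens n_nodes → Pre_allot_verbatim_phrases tokens n_nodes → Spec_allot_verbatim_phrases tokens n_nodes (allot_verbatim_phrases tokens n_nodes)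

-- ===== LEMMAS AND PROOFS =====

theorem pv_chars_join_split (sep : List Char) : ∀ (xs ys : List (List Char)), xs ≠ [] → ys ≠ [] →
    PySem.Chars.join sep (xs ++ ys) = PySem.Chars.join sep xs ++ sep ++ PySem.Chars.join sep ys := by
  intro xs
  induction xs with
  | nil => intro ys h; exact absurd rfl h
  | cons p rest ih =>
    intro ys _ hy
    cases rest with
    | nil =>
      cases ys with
      | nil => exact absurd rfl hy
      | cons y ys' =>
        simp [PySem.Chars.join_cons_cons, PySem.Chars.join_singleton]
    | cons q rest' =>
      have h1 := ih ys (by simp) hy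
      simp only [List.cons_append] at *
      rw [PySem.Chars.join_cons_cons, PySem.Chars.join_cons_cons, h1]
      simp [List.append_assoc]

-- ' '.join of a singleton is the element itself
theorem pv_join_singleton (x : String) : PySem.Str.join " " [x] = x := by
  apply String.toList_inj.mp
  simp [PySem.Str.toList_join, PySem.Chars.join_singleton]

-- ' '.join splits across a concatenation of two nonempty lists
theorem pv_join_split (xs ys : List String) (hx : xs ≠ []) (hy : ys ≠ []) :
    PySem.Str.join " " (xs ++ ys) = PySem.Str.join " " xs ++ " " ++ PySem.Str.join " " ys := by
  apply String.toList_inj.mp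
  simp only [String.toList_append, PySem.Str.toList_join, List.map_append]
  exact pv_chars_join_split _ _ _ (by simpa using hx) (by simpa using hy)

-- the value of the one-token slots written by A's loop at indices i, i+1, …, i+k-1
def pvOw (tokens : List String) : Nat → Int → List (Option String) → List (Option String)
  | 0, _, slots => slots
  | k+1, i, slots => pvOw tokens k (i+1) (pvSetA slots i (some (tokens.getD (i+1).toNat "")))

theorem pv_length_pvOw (tokens : List String) :
    ∀ (k : Nat) (i : Int) (slots : List (Option String)),
      (pvOw tokens k i slots).length = slots.length := by
  intro k
  induction k with
  | zero => intro i slots; rfl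
  | succ k ih => intro i slots; simp [pvOw, pvSetA, ih]

theorem pv_get_pvOw (tokens : List String) :
    ∀ (k : Nat) (i : Int) (slots : List (Option String)) (j : Int), 0 ≤ i → 0 ≤ j →
      j.toNat < slots.length →
      (pvOw tokens k i slots)[j.toNat]? =
        if i ≤ j ∧ j < i + k then some (some (tokens.getD (j + 1).toNat "")) else slots[j.toNat]? := by
  intro k
  induction k with
  | zero =>
    intro i slots j hi hj hlen
    simp [pvOw]
  | succ k ih =>
    intro i slots j hi hj hlen
    have hlen' : j.toNat < (pvSetA slots i (some (tokens.getD (i+1).toNat ""))).length := by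
      simpa [pvSetA] using hlen
    rw [pvOw, ih (i+1) _ j (by omega) hj hlen']
    by_cases hji : j = i
    · subst hji
      have h1 : ¬ (j + 1 ≤ j ∧ j < j + 1 + (k:Int)) := by omega
      have h2 : j ≤ j ∧ j < j + ((k:Nat)+1 : Nat) := by
        constructor
        · omega
        · push_cast; omega
      rw [if_neg h1, if_pos h2]
      simp only [pvSetA]
      rw [List.getElem?_set]
      simp [hlen]
    · have hne : i.toNat ≠ j.toNat := by omega
      simp only [pvSetA]
      rw [List.getElem?_set, if_neg hne]
      by_cases h : i + 1 ≤ j ∧ j < i + 1 + (k:Int)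
      · rw [if_pos h, if_pos (by push_cast at h ⊢; omega)]
      · rw [if_neg h, if_neg (by push_cast at h ⊢; omega)]

-- after the core slot, A's loop gives every further slot exactly one token
theorem pv_fill_ones (tokens : List String) (ns : Int)
    (hns : ns + 1 ≤ (tokens.length : Int)) :
    ∀ (k : Nat) (i : Int) (slots : List (Option String)), 1 ≤ i → i + (k : Int) = ns →
      pvFillA tokens (tokens.length : Int) ns k i (slots, i + 1) =
        (pvOw tokens k i slots, ns + 1) := by
  intro k
  induction k with
  | zero =>
    intro i slots hi hik
    have : i = ns := by omega
    subst this
    rfl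
  | succ k ih =>
    intro i slots hi hik
    have hbrk : ¬ ((tokens.length : Int) ≤ i + 1) := by omega
    have hgive : ¬ (i = 0 ∧ ns - i < (tokens.length : Int) - (i+1)) := by omega
    have hmin : min (1:Int) ((tokens.length : Int) - (i+1)) = 1 := by omega
    have hidx : (i+1).toNat < tokens.length := by omega
    have hslice : PySem.List.slice tokens (some (i+1)) (some (i+1+1)) = [tokens[(i+1).toNat]] := by
      have h1 : (i+1+1).toNat - (i+1).toNat = 1 := by omega
      rw [PySem.List.slice_toNat tokens (by omega) (by omega), h1, List.drop_eq_getElem_cons hidx]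
      rfl
    rw [pvFillA, if_neg hbrk]
    simp only [if_neg hgive, hmin, hslice, pv_join_singleton]
    have hgd : tokens[(i+1).toNat] = tokens.getD (i+1).toNat "" := by
      rw [List.getD_eq_getElem?_getD, List.getElem?_eq_getElem hidx]; rfl
    rw [hgd]
    have hrec := ih (i+1) (pvSetA slots i (some (tokens.getD (i+1).toNat ""))) (by omega) (by push_cast at hik ⊢; omega)
    rw [show i + 1 + 1 = (i+1) + 1 by ring] at *
    rw [hrec, pvOw]

-- splitting A's padded node map at n_active
theorem pv_nodes_split (g : Int → Option String × Option String) (a n_nodes : Int)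
    (h0 : 0 ≤ a) (h1 : a ≤ n_nodes) :
    (PySem.List.pyRange 0 n_nodes).map (fun i => if i < a then g i else (none, none)) =
      (PySem.List.pyRange 0 a).map g ++ List.replicate (n_nodes - a).toNat (none, none) := by
  rw [PySem.List.pyRange_one_append 0 a n_nodes h0 h1, List.map_append]
  congr 1
  · apply List.map_congr_left
    intro i hi
    exact if_pos (PySem.List.mem_pyRange_one.mp hi).2
  · rw [List.map_congr_left (g := fun _ => ((none : Option String), (none : Option String)))
      (fun i hi => if_neg (by have := (PySem.List.mem_pyRange_one.mp hi).1; omega))]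
    rw [show (fun (_ : Int) => ((none : Option String), (none : Option String))) = Function.const Int ((none : Option String), (none : Option String)) from rfl,
      List.map_const, PySem.List.length_pyRange_one]

theorem pv_main (tokens : List String) (n_nodes : Int) (hpre : 0 ≤ n_nodes) :
    allot_verbatim_phrases tokens n_nodes = allot_verbatim_phrases_alt tokens n_nodes := by
  unfold allot_verbatim_phrases allot_verbatim_phrases_alt
  dsimp only
  set nt : Int := (tokens.length : Int) with hnt
  set fd : Int := PySem.Int.floordiv (nt - 2) 3 with hfd
  set a : Int := min n_nodes (max 0 fd) with ha
  have ha0 : 0 ≤ a := le_min hpre (le_max_left _ _)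
  have han : a ≤ n_nodes := min_le_left _ _
  by_cases hpos : 0 < a
  · -- at least one active node: core takes two tokens, every further slot one,
    -- the leftover is appended to the last slot
    have hafd : a ≤ fd := by
      have h1 : a ≤ max 0 fd := min_le_right _ _
      by_cases h : 0 ≤ fd
      · rwa [max_eq_right h] at h1
      · rw [max_eq_left (by omega)] at h1; omega
    have h3a : a * 3 ≤ nt - 2 := by
      have := (PySem.Int.le_floordiv_iff_mul_le (a := nt - 2) (b := 3) (q := a) (by norm_num)).mp hafd
      omega
    have hbneg : ¬ (a ≤ 0) := by omega
    rw [if_neg hbneg]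
    have h5 : (5:Int) ≤ nt := by omega
    have hns : (1 + 2*a).toNat = (2*a).toNat + 1 := by omega
    set v0 : Option String := some (PySem.Str.join " " (PySem.List.slice tokens (some 0) (some 2))) with hv0
    set slots0 : List (Option String) := pvSetA (List.replicate (1 + 2*a).toNat none) 0 v0 with hs0
    set slots1 : List (Option String) := pvOw tokens (2*a).toNat 1 slots0 with hs1
    have hlen0 : slots0.length = (1 + 2*a).toNat := by simp [hs0, pvSetA]
    have hlen1 : slots1.length = (1 + 2*a).toNat := by rw [hs1, pv_length_pvOw, hlen0]
    have hfill : pvFillA tokens nt (1 + 2*a) ((1 + 2*a).toNat) 0 (List.replicate (1 + 2*a).toNat none, 0)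
        = (slots1, (1 + 2*a) + 1) := by
      rw [hns, pvFillA, if_neg (show ¬ (nt ≤ (0:Int)) by omega)]
      dsimp only
      rw [if_pos (show (0:Int) = 0 ∧ (1 + 2*a) - 0 < nt - 0 from ⟨rfl, by omega⟩)]
      rw [show min (2:Int) (nt - 0) = 2 by omega]
      rw [show (0:Int) + 2 = 1 + 1 by norm_num, show (0:Int) + 1 = 1 by norm_num,
        show (1:Int) + 1 = 2 by norm_num, ← hns, ← hv0, ← hs0, hnt]
      have h := pv_fill_ones tokens (1 + 2*a) (by omega) ((2*a).toNat) 1 slots0 (by omega) (by omega)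
      rw [show (1:Int) + 1 = 2 by norm_num] at h
      exact h
    have hget : ∀ j : Int, 0 ≤ j → j < 1 + 2*a →
        PySem.List.pyGet? slots1 j = some (if 1 ≤ j then some (tokens.getD (j+1).toNat "") else v0) := by
      intro j h0 h1
      rw [PySem.List.pyGet?_of_nonneg _ h0, hs1,
        pv_get_pvOw tokens ((2*a).toNat) 1 slots0 j (by omega) h0 (by omega)]
      by_cases h2 : 1 ≤ j
      · rw [if_pos (show 1 ≤ j ∧ j < 1 + ((2*a).toNat : Int) by omega), if_pos h2]
      · rw [if_neg (show ¬ (1 ≤ j ∧ j < 1 + ((2*a).toNat : Int)) by omega), if_neg h2, hs0]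
        simp only [pvSetA]
        rw [List.getElem?_set]
        have hj0 : j.toNat = 0 := by omega
        rw [hj0]
        simp [show 0 < (1 + 2*a).toNat by omega]
    rw [hfill]
    rw [if_pos (show ((slots1, (1 + 2*a) + 1) : List (Option String) × Int).2 < nt by dsimp only; omega)]
    dsimp only
    set s1 : String := tokens.getD (2*a+1).toNat "" with hsv
    set wL : Option String := some (s1 ++ " " ++ PySem.Str.join " " (PySem.List.slice tokens (some ((1 + 2*a) + 1)) none)) with hwL
    have htail : pvTailA tokens ((1 + 2*a) + 1) ((1 + 2*a).toNat) (1 + 2*a - 1) slots1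
        = pvSetA slots1 (1 + 2*a - 1) wL := by
      rw [hns, pvTailA, hget (1 + 2*a - 1) (by omega) (by omega)]
      rw [if_pos (show (1:Int) ≤ 1 + 2*a - 1 by omega)]
      rw [show ((1 + 2*a - 1) + 1).toNat = (2*a+1).toNat by omega]
      rfl
    rw [htail]
    set slots2 : List (Option String) := pvSetA slots1 (1 + 2*a - 1) wL with hs2
    have hget2 : ∀ j : Int, 0 ≤ j → j < 1 + 2*a →
        PySem.List.pyGet? slots2 j
          = some (if j = 1 + 2*a - 1 then wL
                  else if 1 ≤ j then some (tokens.getD (j+1).toNat "") else v0) := by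
      intro j h0 h1
      rw [PySem.List.pyGet?_of_nonneg _ h0, hs2]
      simp only [pvSetA]
      rw [List.getElem?_set]
      by_cases hj : j = 1 + 2*a - 1
      · rw [if_pos (show (1 + 2*a - 1).toNat = j.toNat by omega),
          if_pos (show (1 + 2*a - 1).toNat < slots1.length by omega), if_pos hj]
      · rw [if_neg (show ¬ (1 + 2*a - 1).toNat = j.toNat by omega),
          ← PySem.List.pyGet?_of_nonneg _ h0, hget j h0 h1, if_neg hj]
    congr 1
    · -- the core phrase
      rw [hget2 0 le_rfl (by omega), if_neg (by omega), if_neg (by norm_num)]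
      rw [hv0, PySem.List.slice_zero_start]
      rfl
    · -- the node phrases
      rw [pv_nodes_split _ a n_nodes ha0 han]
      congr 1
      apply List.map_congr_left
      intro i hi
      obtain ⟨h0i, hia⟩ := PySem.List.mem_pyRange_one.mp hi
      congr 1
      · -- image phrase of node i
        rw [hget2 (1 + 2*i) (by omega) (by omega), if_neg (by omega), if_pos (by omega)]
        rw [PySem.List.pyGet?_of_nonneg _ (show (0:Int) ≤ 2 + 2*i by omega),
          show ((1 + 2*i) + 1).toNat = (2 + 2*i).toNat by omega, List.getD_eq_getElem?_getD]
        rfl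
      · -- text phrase of node i
        by_cases hlast : i = a - 1
        · rw [hget2 (1 + 2*i + 1) (by omega) (by omega), if_pos (show 1 + 2*i + 1 = 1 + 2*a - 1 by omega)]
          rw [if_neg (show ¬ i < a - 1 by omega)]
          rw [hwL]
          rw [show (3 + 2*i : Int) = 2*a + 1 by omega]
          rw [PySem.List.slice_from tokens (by omega), PySem.List.slice_from tokens (by omega)]
          have hdrop : tokens.drop (2*a+1).toNat
              = [tokens[(2*a+1).toNat]'(by omega)] ++ tokens.drop (((1 + 2*a) + 1).toNat) := by
            rw [List.drop_eq_getElem_cons (by omega)]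
            rw [show (2*a+1).toNat + 1 = ((1 + 2*a) + 1).toNat by omega]
            rfl
          rw [hdrop, pv_join_split _ _ (by simp)
            (by
              apply List.ne_nil_of_length_pos
              rw [List.length_drop]
              omega)]
          rw [pv_join_singleton, hsv, List.getD_eq_getElem?_getD,
            List.getElem?_eq_getElem (show (2*a+1).toNat < tokens.length by omega)]
          rfl
        · rw [hget2 (1 + 2*i + 1) (by omega) (by omega), if_neg (by omega), if_pos (by omega)]
          rw [if_pos (show i < a - 1 by omega)]
          rw [PySem.List.pyGet?_of_nonneg _ (show (0:Int) ≤ 3 + 2*i by omega),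
            show ((1 + 2*i + 1) + 1).toNat = (3 + 2*i).toNat by omega, List.getD_eq_getElem?_getD]
          rfl
  · -- no active node: the single core slot absorbs every token
    have haz : a = 0 := by omega
    rw [haz]
    rw [if_pos (le_refl (0:Int))]
    norm_num
    constructor
    · -- the core phrase absorbs every token
      by_cases htok : tokens = []
      · subst htok
        have h0 : nt = 0 := by simp [hnt]
        norm_num [h0, pvFillA, PySem.List.pyGet?_zero_cons]
      · rw [if_neg htok]
        have hlp : 0 < tokens.length := List.length_pos_of_ne_nil htok
        by_cases h2 : 2 ≤ nt
        · have hfillA : pvFillA tokens nt 1 1 0 ([none], 0)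
              = ([some (PySem.Str.join " " (PySem.List.slice tokens (some 0) (some 2)))], 2) := by
            rw [pvFillA, if_neg (show ¬ nt ≤ (0:Int) by omega)]
            dsimp only
            rw [if_pos (show (0:Int) = 0 ∧ 1 - 0 < nt - 0 from ⟨rfl, by omega⟩)]
            rw [show min (2:Int) (nt - 0) = 2 by omega, show (0:Int) + 2 = 2 by norm_num]
            rfl
          rw [hfillA]
          dsimp only
          have htk : tokens = List.take 2 tokens ++ List.drop 2 tokens := (List.take_append_drop 2 tokens).symm
          have hsl0 : PySem.List.slice tokens (some (0:Int)) (some 2) = List.take 2 tokens := by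
            rw [PySem.List.slice_zero_start, PySem.List.slice_to tokens (by norm_num)]
            rfl
          by_cases h3 : 2 < nt
          · rw [if_pos h3, pvTailA]
            simp only [PySem.List.pyGet?_zero_cons, Option.getD, pvSetA, Int.toNat_zero, List.set]
            rw [hsl0, PySem.List.slice_from tokens (by norm_num)]
            conv_rhs => rw [htk]
            rw [pv_join_split _ _
              (by
                apply List.ne_nil_of_length_pos
                rw [List.length_take]
                omega)
              (by
                apply List.ne_nil_of_length_pos
                rw [List.length_drop]
                omega)]
            rfl
          · rw [if_neg h3]
            rw [PySem.List.pyGet?_zero_cons]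
            dsimp only [Option.getD]
            rw [hsl0, List.take_of_length_le (by omega)]
        · have hfillB : pvFillA tokens nt 1 1 0 ([none], 0)
              = ([some (PySem.Str.join " " (PySem.List.slice tokens (some 0) (some 1)))], 1) := by
            rw [pvFillA, if_neg (show ¬ nt ≤ (0:Int) by omega)]
            dsimp only
            rw [if_neg (show ¬ ((0:Int) = 0 ∧ 1 - 0 < nt - 0) by omega)]
            rw [show min (1:Int) (nt - 0) = 1 by omega, show (0:Int) + 1 = 1 by norm_num]
            rfl
          rw [hfillB]
          dsimp only
          rw [if_neg (by omega)]
          rw [PySem.List.pyGet?_zero_cons]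
          dsimp only [Option.getD]
          rw [PySem.List.slice_zero_start, PySem.List.slice_to tokens (by norm_num),
            show ((1:Int).toNat) = 1 from rfl, List.take_of_length_le (by omega)]
    · -- every node slot is dropped
      rw [pv_nodes_split _ 0 n_nodes le_rfl hpre]
      rw [PySem.List.pyRange_one_eq_nil le_rfl]
      norm_num

-- ===== VERDICT (by name: the statement is the Claim_ definition above) =====
theorem allot_verbatim_phrases_spec : Claim_equal_allot_verbatim_phrases := by
  intro tokens n_nodes _ hpre
  exact pv_main tokens n_nodes hpre
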